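-- pv_equiv track=rewrite | github.com/krlohnes/weymouth-waste-pickup | validation/weymouth_pdf_parser.py | group_streets_alphabetically
-- ===== SOURCE A (Python) =====
-- def group_streets_alphabetically(streets):
--     """Group streets into alphabetical ranges."""
--     groups = {
--         'a-c': [],
--         'd-g': [],
--         'h-m': [],
--         'n-s': [],
--         't-z': []
--     }
--
--     for street in streets:
--         first_letter = street['street'][0].lower()
--
--         if first_letter <= 'c':
--             groups['a-c'].append(street)
--         elif first_letter <= 'g':
--             groups['d-g'].append(street)
--         elif first_letter <= 'm':
--             groups['h-m'].append(street)
--         elif first_letter <= 's':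
--             groups['n-s'].append(street)
--         else:
--             groups['t-z'].append(street)
--
--     # Sort each group by street name
--     for group in groups.values():
--         group.sort(key=lambda x: x['street'])
--
--     return groups
-- ===== SOURCE B (Python) =====
-- def group_streets_alphabetically(streets):
--     """Group streets into alphabetical ranges: one global stable sort, then a single bucketing pass (no per-bucket sorts)."""
--     groups = {
--         'a-c': [],
--         'd-g': [],
--         'h-m': [],
--         'n-s': [],
--         't-z': []
--     }
--
--     for street in sorted(streets, key=lambda x: x['street']):
--         first_letter = street['street'][0].lower()
--
--         if first_letter <= 'c':
--             key = 'a-c'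
--         elif first_letter <= 'g':
--             key = 'd-g'
--         elif first_letter <= 'm':
--             key = 'h-m'
--         elif first_letter <= 's':
--             key = 'n-s'
--         else:
--             key = 't-z'
--         groups[key].append(street)
--
--     return groups
-- ===== Notes on version B (the rewrite author's own statement) =====
-- stated objective: alternative
-- what changed: B replaces A's partition-then-sort-each-of-five-buckets with one global stable sort by street name followed by a single bucketing pass (stability makes each bucket come out already sorted).
import Mathlib
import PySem

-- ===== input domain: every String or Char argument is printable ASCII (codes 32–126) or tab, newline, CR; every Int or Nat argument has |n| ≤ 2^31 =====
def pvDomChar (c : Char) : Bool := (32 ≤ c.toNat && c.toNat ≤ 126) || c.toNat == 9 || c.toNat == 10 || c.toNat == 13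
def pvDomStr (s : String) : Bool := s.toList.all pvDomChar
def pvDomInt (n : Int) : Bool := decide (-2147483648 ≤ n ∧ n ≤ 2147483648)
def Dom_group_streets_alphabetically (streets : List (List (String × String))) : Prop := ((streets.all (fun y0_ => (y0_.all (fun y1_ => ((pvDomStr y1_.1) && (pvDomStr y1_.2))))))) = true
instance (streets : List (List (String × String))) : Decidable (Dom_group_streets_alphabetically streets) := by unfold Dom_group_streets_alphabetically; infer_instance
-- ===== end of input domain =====

-- B's change (also in claim.json): one global stable sort by street name, then a single
-- bucketing pass — stability makes each bucket already sorted, so no per-bucket sorts.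

-- shared primitive: the Python subscript x['street'] (both programs use this very lambda)
def pvStreetName (x : List (String × String)) : String := (PySem.Dict.mk x).getD "street" ""

-- ===== PORT A =====
-- A: build the five empty buckets, append each street into its bucket via the if/elif
-- chain, then sort every bucket by street name.
def group_streets_alphabetically (streets : List (List (String × String))) : List (String × List (List (String × String))) :=
  let groups : PySem.Dict String (List (List (String × String))) :=
    PySem.Dict.mk [("a-c", []), ("d-g", []), ("h-m", []), ("n-s", []), ("t-z", [])]
  let groups := streets.foldl (fun d street =>
    let first_letter := PySem.Chars.lowerChar (PySem.List.pyGetD (pvStreetName street).toList 0 ' ')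
    if first_letter ≤ 'c' then d.modify "a-c" [] (· ++ [street])
    else if first_letter ≤ 'g' then d.modify "d-g" [] (· ++ [street])
    else if first_letter ≤ 'm' then d.modify "h-m" [] (· ++ [street])
    else if first_letter ≤ 's' then d.modify "n-s" [] (· ++ [street])
    else d.modify "t-z" [] (· ++ [street])) groups
  groups.items.map (fun p => (p.1, PySem.List.sorted p.2 (fun x => pvStreetName x) false))

-- ===== PORT B =====
-- B's if/elif chain computing the bucket key of a street
def pvBucketKey (street : List (String × String)) : String :=
  let first_letter := PySem.Chars.lowerChar (PySem.List.pyGetD (pvStreetName street).toList 0 ' ')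
  if first_letter ≤ 'c' then "a-c"
  else if first_letter ≤ 'g' then "d-g"
  else if first_letter ≤ 'm' then "h-m"
  else if first_letter ≤ 's' then "n-s"
  else "t-z"

def group_streets_alphabetically_alt (streets : List (List (String × String))) : List (String × List (List (String × String))) :=
  let groups : PySem.Dict String (List (List (String × String))) :=
    PySem.Dict.mk [("a-c", []), ("d-g", []), ("h-m", []), ("n-s", []), ("t-z", [])]
  let ordered := PySem.List.sorted streets (fun x => pvStreetName x) false
  let groups := ordered.foldl (fun d street => d.modify (pvBucketKey street) [] (· ++ [street])) groups
  groups.items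

-- ===== PRECONDITION & SPEC =====
-- Pre_ excludes exactly the inputs where Python A raises: a street dict without a
-- 'street' key (KeyError) or with an empty street name (IndexError at [0]).
def Pre_group_streets_alphabetically (streets : List (List (String × String))) : Prop :=
  ∀ st ∈ streets, (PySem.Dict.mk st).getD "street" "" ≠ ""
instance (streets : List (List (String × String))) : Decidable (Pre_group_streets_alphabetically streets) := by unfold Pre_group_streets_alphabetically; infer_instance
def pvWitness_group_streets_alphabetically : (List (List (String × String))) :=
  [[("street", "Apple St")], [("street", "Main St"), ("side", "E")]]

def Spec_group_streets_alphabetically (streets : List (List (String × String))) (out : List (String × List (List (String × String)))) : Prop := out = group_streets_alphabetically_alt streets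
instance (streets : List (List (String × String))) (out : List (String × List (List (String × String)))) : Decidable (Spec_group_streets_alphabetically streets out) := by unfold Spec_group_streets_alphabetically; infer_instance

-- ===== CLAIM (what is proved, stated in full; the proofs are below) =====
def Claim_equal_group_streets_alphabetically : Prop := ∀ (streets : List (List (String × String))), Dom_group_streets_alphabetically streets → Pre_group_streets_alphabetically streets → Spec_group_streets_alphabetically streets (group_streets_alphabetically streets)

-- ===== LEMMAS AND PROOFS =====

-- the five bucket keys
def pvK5 : List String := ["a-c", "d-g", "h-m", "n-s", "t-z"]

lemma pvBucketKey_mem (st : List (String × String)) : pvBucketKey st ∈ pvK5 := by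
  simp only [pvBucketKey, pvK5]
  split_ifs <;> simp

lemma insertBy_cons_of_forall (x : α) (before : α → α → Bool) (l : List α)
    (h : ∀ z ∈ l, before x z = true) :
    PySem.List.insertBy before x l = x :: l := by
  cases l with
  | nil => rfl
  | cons y ys => simp [PySem.List.insertBy, h y (by simp)]

-- filtering commutes with one stable insertion into a key-sorted list
lemma insertBy_cons {α : Type} (before : α → α → Bool) (x y : α) (ys : List α) :
    PySem.List.insertBy before x (y :: ys)
      = if before x y then x :: y :: ys else y :: PySem.List.insertBy before x ys := rfl

lemma filter_insertBy {α : Type} (key : α → String) (p : α → Bool) (x : α) (l : List α)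
    (h : l.Pairwise (fun a b => key a ≤ key b)) :
    (PySem.List.insertBy (fun a b => decide (key a < key b)) x l).filter p
      = if p x then PySem.List.insertBy (fun a b => decide (key a < key b)) x (l.filter p)
        else l.filter p := by
  induction l with
  | nil => cases hp : p x <;> simp [PySem.List.insertBy, hp]
  | cons y ys ih =>
    rcases List.pairwise_cons.mp h with ⟨hy, hys⟩
    have ih' := ih hys
    rw [insertBy_cons]
    by_cases hlt : key x < key y
    · rw [if_pos (by exact decide_eq_true hlt)]
      have hfall : ∀ z ∈ (y :: ys).filter p, decide (key x < key z) = true := by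
        intro z hz
        have hz2 := List.mem_of_mem_filter hz
        rcases List.mem_cons.mp hz2 with rfl | hz3
        · exact decide_eq_true hlt
        · exact decide_eq_true (lt_of_lt_of_le hlt (hy z hz3))
      cases hp : p x
      · rw [if_neg (by simp), List.filter_cons_of_neg (by simp [hp])]
      · rw [if_pos rfl, insertBy_cons_of_forall x _ _ hfall,
            List.filter_cons_of_pos (by simp [hp])]
    · rw [if_neg (by simpa using hlt)]
      cases hpy : p y
      · rw [List.filter_cons_of_neg (by simp [hpy]), List.filter_cons_of_neg (by simp [hpy]), ih']
      · rw [List.filter_cons_of_pos (by simp [hpy]), List.filter_cons_of_pos (by simp [hpy]), ih']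
        cases hp : p x
        · rw [if_neg (by simp), if_neg (by simp)]
        · rw [if_pos rfl, if_pos rfl, insertBy_cons, if_neg (by simpa using hlt)]

-- filtering commutes with the stable sort
lemma sorted_append_singleton {α : Type} (key : α → String) (l : List α) (x : α) :
    PySem.List.sorted (l ++ [x]) key false
      = PySem.List.insertBy (fun a b => decide (key a < key b)) x (PySem.List.sorted l key false) := by
  rw [PySem.List.sorted_eq_foldl_insertBy, List.foldl_append, ← PySem.List.sorted_eq_foldl_insertBy]
  rfl

lemma filter_sorted {α : Type} (key : α → String) (p : α → Bool) (l : List α) :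
    (PySem.List.sorted l key false).filter p = PySem.List.sorted (l.filter p) key false := by
  induction l using List.reverseRecOn with
  | nil => rfl
  | append_singleton l x ih =>
    rw [sorted_append_singleton, filter_insertBy key p x _ (PySem.List.sorted_pairwise l key),
        List.filter_append]
    cases hp : p x
    · rw [if_neg (by simp [hp]), ih]
      simp [hp]
    · rw [if_pos rfl, ih]
      have : List.filter p [x] = [x] := by simp [hp]
      rw [this, sorted_append_singleton]

def pvInit : PySem.Dict String (List (List (String × String))) :=
  PySem.Dict.mk [("a-c", []), ("d-g", []), ("h-m", []), ("n-s", []), ("t-z", [])]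

-- the bucketing loop, characterised: bucket k holds the sub-list of streets with bucket key k
lemma fold_items (l : List (List (String × String))) :
    (l.foldl (fun d street => d.modify (pvBucketKey street) [] (· ++ [street])) pvInit).items
      = pvK5.map (fun k => (k, l.filter (fun s => pvBucketKey s == k))) := by
  have hkeys : (l.foldl (fun d street => d.modify (pvBucketKey street) [] (· ++ [street])) pvInit).keys = pvK5 := by
    rw [PySem.Dict.keys_foldl_modify_key l pvBucketKey [] (fun _ street v => v ++ [street]) pvInit]
    rw [PySem.Set.update_eq_append_filter]
    have : (PySem.Set.ofList (l.map pvBucketKey)).filter (fun y => !(PySem.Set.contains pvInit.keys y)) = [] := by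
      rw [List.filter_eq_nil_iff]
      intro y hy
      have : y ∈ l.map pvBucketKey := (PySem.Set.mem_ofList _ _).mp hy
      rcases List.mem_map.mp this with ⟨s, _, rfl⟩
      have hk5 : pvInit.keys = pvK5 := by decide
      have hc : PySem.Set.contains pvInit.keys (pvBucketKey s) = true :=
        (PySem.Set.contains_iff _ _).mpr (hk5 ▸ pvBucketKey_mem s)
      rw [hc]
      decide
    rw [this, List.append_nil]
    rfl
  have hnd : (l.foldl (fun d street => d.modify (pvBucketKey street) [] (· ++ [street])) pvInit).keys.Nodup := by
    exact PySem.Dict.nodup_keys_foldl_modify_key l pvBucketKey [] (fun _ street v => v ++ [street]) pvInit (by decide)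
  have hgetD : ∀ c, (l.foldl (fun d street => d.modify (pvBucketKey street) [] (· ++ [street])) pvInit).getD c []
      = pvInit.getD c [] ++ l.filter (fun s => pvBucketKey s == c) := by
    intro c
    have hmap : l.foldl (fun d street => d.modify (pvBucketKey street) [] (· ++ [street])) pvInit
        = (l.map (fun s => (pvBucketKey s, s))).foldl (fun d p => d.modify p.1 [] (· ++ [p.2])) pvInit := by
      rw [List.foldl_map]
    rw [hmap, PySem.Dict.getD_foldl_modify_append]
    congr 1
    rw [List.filter_map]
    simp [Function.comp_def]
  rw [PySem.Dict.items_eq_map_keys _ hnd [], hkeys]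
  apply List.map_congr_left
  intro k hk
  rw [hgetD k]
  have : pvInit.getD k [] = [] := by
    fin_cases hk <;> decide
  rw [this, List.nil_append]

-- the five-way branch in A's loop is exactly 'modify at pvBucketKey'
lemma foldA_body :
    (fun (d : PySem.Dict String (List (List (String × String)))) street =>
      let first_letter := PySem.Chars.lowerChar (PySem.List.pyGetD (pvStreetName street).toList 0 ' ')
      if first_letter ≤ 'c' then d.modify "a-c" [] (· ++ [street])
      else if first_letter ≤ 'g' then d.modify "d-g" [] (· ++ [street])
      else if first_letter ≤ 'm' then d.modify "h-m" [] (· ++ [street])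
      else if first_letter ≤ 's' then d.modify "n-s" [] (· ++ [street])
      else d.modify "t-z" [] (· ++ [street]))
    = (fun d street => d.modify (pvBucketKey street) [] (· ++ [street])) := by
  funext d street
  simp only [pvBucketKey]
  split_ifs <;> rfl

-- ===== VERDICT (by name: the statement is the Claim_ definition above) =====
theorem group_streets_alphabetically_spec : Claim_equal_group_streets_alphabetically := by
  intro streets _ _
  show group_streets_alphabetically streets = group_streets_alphabetically_alt streets
  unfold group_streets_alphabetically group_streets_alphabetically_alt
  simp only []
  rw [show (PySem.Dict.mk [("a-c", []), ("d-g", []), ("h-m", []), ("n-s", []), ("t-z", [])]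
        : PySem.Dict String (List (List (String × String)))) = pvInit from rfl]
  rw [foldA_body, fold_items, fold_items]
  rw [List.map_map]
  apply List.map_congr_left
  intro k _
  simp only [Function.comp]
  rw [← filter_sorted]
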